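-- pv_equiv track=rewrite | github.com/OlegPhenomenon/hdc-brain | lessons/utility.py | bundle_binary
-- ===== SOURCE A (Python) =====
-- def bundle_binary(hdvs):
--   hdvs_size = len(hdvs)
--   hdv_size = len(hdvs[0])
--   result = []
--
--   for i in range(hdv_size):
--     total = 0
--
--     for j in range(hdvs_size):
--       total = total + hdvs[j][i]
--
--     if total > 0:
--       result.append(1)
--     elif total < 0:
--       result.append(-1)
--     else:
--       result.append(1)
--
--   return result
-- ===== SOURCE B (Python) =====
-- def bundle_binary(hdvs):
--   hdv_size = len(hdvs[0])
--
--   def sums(rows):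
--     # divide and conquer: component-wise sum of a non-empty block of rows
--     if len(rows) == 1:
--       return rows[0][:hdv_size]
--     mid = len(rows) // 2
--     return [x + y for x, y in zip(sums(rows[:mid]), sums(rows[mid:]))]
--
--   return [1 if t >= 0 else -1 for t in sums(hdvs)]
-- ===== Notes on version B (the rewrite author's own statement) =====
-- stated objective: alternative
-- what changed: Replaces A's nested index loops (one full scan of all hypervectors per component) with a recursive divide-and-conquer reduction: the list of hypervectors is split in half, each half is reduced to a component-wise sum vector, the halves are merged by element-wise addition, and only the final vector is mapped to signs (ties still give 1).
import Mathlib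
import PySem

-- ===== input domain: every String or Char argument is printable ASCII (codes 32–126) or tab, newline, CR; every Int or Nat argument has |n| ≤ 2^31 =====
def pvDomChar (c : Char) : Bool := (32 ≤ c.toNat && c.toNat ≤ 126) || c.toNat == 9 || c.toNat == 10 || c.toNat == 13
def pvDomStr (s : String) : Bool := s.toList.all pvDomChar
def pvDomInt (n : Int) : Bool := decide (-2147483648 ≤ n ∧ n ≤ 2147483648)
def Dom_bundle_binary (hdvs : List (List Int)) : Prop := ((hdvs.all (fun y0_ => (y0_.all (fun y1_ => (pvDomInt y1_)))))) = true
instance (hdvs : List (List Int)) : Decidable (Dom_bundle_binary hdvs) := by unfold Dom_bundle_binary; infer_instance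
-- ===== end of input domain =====

-- B replaces A's nested index loops with a recursive divide-and-conquer reduction (halve, sum halves component-wise, sign once at the top); same cost, different algorithmic decomposition (return-value equivalence on Pre_).


-- ===== PORT A =====
def bundle_binary (hdvs : List (List Int)) : List Int :=
  let hdvs_size := hdvs.length
  let hdv_size := (PySem.List.pyGetD hdvs 0 []).length
  (PySem.List.pyRange 0 hdv_size 1).foldl
    (fun result i =>
      let total := (PySem.List.pyRange 0 hdvs_size 1).foldl
        (fun total j => total + PySem.List.pyGetD (PySem.List.pyGetD hdvs j []) i 0) 0
      if total > 0 then result ++ [1]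
      else if total < 0 then result ++ [(-1)]
      else result ++ [1]) []

-- ===== PORT B =====
-- recursive helper `sums` of Source B: component-wise sum of a block of rows by halving
-- (Python calls it only on non-empty blocks; the `[]` case here returns [] like rows[0][:n] would never be reached)
def pvSums (n : Nat) (rows : List (List Int)) : List Int :=
  if _h : rows.length ≤ 1 then (rows.headD []).take n
  else
    ((pvSums n (rows.take (rows.length / 2))).zip
      (pvSums n (rows.drop (rows.length / 2)))).map (fun p => p.1 + p.2)
termination_by rows.length
decreasing_by
  · simpa using by omega
  · simpa using by omega

def bundle_binary_alt (hdvs : List (List Int)) : List Int :=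
  let hdv_size := (PySem.List.pyGetD hdvs 0 []).length
  (pvSums hdv_size hdvs).map (fun t => if 0 ≤ t then 1 else -1)

-- ===== PRECONDITION & SPEC =====
-- Pre_ excludes exactly the inputs where Python A raises IndexError: the empty list
-- (len(hdvs[0])) and ragged inputs with a row shorter than the first row (hdvs[j][i]).
def Pre_bundle_binary (hdvs : List (List Int)) : Prop :=
  hdvs ≠ [] ∧ ∀ row ∈ hdvs, (hdvs.headD []).length ≤ row.length
instance (hdvs : List (List Int)) : Decidable (Pre_bundle_binary hdvs) := by unfold Pre_bundle_binary; infer_instance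
def pvWitness_bundle_binary : List (List Int) := [[1, -2, 0], [-1, -2, 3]]

def Spec_bundle_binary (hdvs : List (List Int)) (out : List Int) : Prop := out = bundle_binary_alt hdvs
instance (hdvs : List (List Int)) (out : List Int) : Decidable (Spec_bundle_binary hdvs out) := by unfold Spec_bundle_binary; infer_instance

-- ===== CLAIM (what is proved, stated in full; the proofs are below) =====
def Claim_equal_bundle_binary : Prop := ∀ (hdvs : List (List Int)), Dom_bundle_binary hdvs → Pre_bundle_binary hdvs → Spec_bundle_binary hdvs (bundle_binary hdvs)

-- ===== LEMMAS AND PROOFS =====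

-- the i-th column sum of hdvs (missing entries default to 0; under Pre_ none are missing)
def pvColSum (hdvs : List (List Int)) (i : Nat) : Int :=
  (hdvs.map (fun row => row.getD i 0)).sum

-- column sums split additively over a concatenation of row blocks
theorem pvColSum_append (a b : List (List Int)) (i : Nat) :
    pvColSum (a ++ b) i = pvColSum a i + pvColSum b i := by
  simp [pvColSum]

-- an element-wise zip-add of two maps over the same range is a map over that range
theorem pv_zip_map_add (n : Nat) (f g : Nat → Int) :
    (((List.range n).map f).zip ((List.range n).map g)).map (fun p => p.1 + p.2)
      = (List.range n).map (fun i => f i + g i) := by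
  apply List.ext_getElem
  · simp
  · intro k h1 h2
    simp at h1
    simp [List.getElem_zip]

-- a prefix of a sufficiently long row is the map of its entries over the range
theorem pv_take_eq_map (n : Nat) (v : List Int) (h : n ≤ v.length) :
    v.take n = (List.range n).map (fun i => v.getD i 0) := by
  apply List.ext_getElem
  · simp [Nat.min_eq_left h]
  · intro k h1 h2
    simp at h1
    simp [List.getD_eq_getElem?_getD, List.getElem?_eq_getElem (by omega : k < v.length)]

-- B's divide-and-conquer helper computes exactly the column sums
theorem pvSums_eq (n : Nat) (rows : List (List Int)) (hne : rows ≠ [])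
    (h : ∀ row ∈ rows, n ≤ row.length) :
    pvSums n rows = (List.range n).map (fun i => pvColSum rows i) := by
  induction rows using pvSums.induct with
  | case1 rows hle =>
    match rows, hne with
    | [v], _ =>
      rw [pvSums]
      simp only [List.length_cons, List.length_nil, le_refl, dif_pos, List.headD_cons]
      rw [pv_take_eq_map n v (h v (by simp))]
      simp [pvColSum]
  | case2 rows hgt ih1 ih2 =>
    rw [pvSums, dif_neg hgt]
    have hm1 : rows.take (rows.length / 2) ≠ [] := by
      intro hc
      have hl := congrArg List.length hc
      rw [List.length_take, List.length_nil] at hl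
      omega
    have hm2 : rows.drop (rows.length / 2) ≠ [] := by
      intro hc
      have hl := congrArg List.length hc
      rw [List.length_drop, List.length_nil] at hl
      omega
    rw [ih1 hm1 (fun r hr => h r (List.mem_of_mem_take hr)),
        ih2 hm2 (fun r hr => h r (List.mem_of_mem_drop hr)),
        pv_zip_map_add]
    apply List.map_congr_left
    intro i _
    conv_rhs => rw [show rows = rows.take (rows.length / 2) ++ rows.drop (rows.length / 2) from (List.take_append_drop _ _).symm]
    rw [pvColSum_append]

-- A's result, characterised as a map over the columns
theorem pv_A_eq (hdvs : List (List Int)) :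
    bundle_binary hdvs =
      (List.range (PySem.List.pyGetD hdvs 0 []).length).map
        (fun i => if 0 ≤ pvColSum hdvs i then 1 else -1) := by
  unfold bundle_binary
  simp only
  have hstep : ∀ (result : List Int) (i : Int),
      (let total := (PySem.List.pyRange 0 (hdvs.length : Int) 1).foldl
        (fun total j => total + PySem.List.pyGetD (PySem.List.pyGetD hdvs j []) i 0) 0
       if total > 0 then result ++ [1]
       else if total < 0 then result ++ [(-1)]
       else result ++ [1])
      = result ++ [if 0 ≤ hdvs.foldl (fun t row => t + PySem.List.pyGetD row i 0) 0 then 1 else -1] := by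
    intro result i
    rw [PySem.List.foldl_pyRange_zero_pyGetD' hdvs []
      (fun t row => t + PySem.List.pyGetD row i 0) 0]
    simp only []
    split_ifs with h1 h2 h3 <;> try rfl
    all_goals omega
  simp only [hstep]
  rw [PySem.List.foldl_append_singleton_eq_map]
  simp only [List.nil_append]
  rw [PySem.List.pyRange_zero_nat]
  rw [List.map_map]
  apply List.map_congr_left
  intro i _
  simp only [Function.comp]
  congr 1
  rw [PySem.List.foldl_add hdvs (fun row => PySem.List.pyGetD row (i : Int) 0) 0]
  simp [pvColSum]

-- ===== VERDICT (by name: the statement is the Claim_ definition above) =====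
theorem bundle_binary_spec : Claim_equal_bundle_binary := by
  intro hdvs _ hpre
  obtain ⟨hne, hlen⟩ := hpre
  unfold Spec_bundle_binary bundle_binary_alt
  simp only
  have h0 : PySem.List.pyGetD hdvs 0 [] = hdvs.headD [] := by
    cases hdvs with
    | nil => simp at hne
    | cons v rest => simp [PySem.List.pyGetD_zero_cons]
  rw [pv_A_eq hdvs, h0, pvSums_eq _ hdvs hne hlen, List.map_map]
  apply List.map_congr_left
  intro i _
  simp [Function.comp]
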